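-- pv_equiv track=rewrite | github.com/Ivan22wyh/spin_mesa_model | pathos_lightcurve.py | find_duplicate_paths
-- ===== SOURCE A (Python) =====
-- def find_duplicate_paths(paths):
--     path_dict = {}
--     for i, path in enumerate(paths):
--         if paths.count(path) > 1:
--             if path in path_dict:
--                 path_dict[path].append(i)
--             else:
--                 path_dict[path] = [i]
--     return path_dict
-- ===== SOURCE B (Python) =====
-- def find_duplicate_paths(paths):
--     result = {}
--     for path in dict.fromkeys(paths):
--         idxs = [i for i, q in enumerate(paths) if q == path]
--         if len(idxs) > 1:
--             result[path] = idxs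
--     return result
-- ===== Notes on version B (the rewrite author's own statement) =====
-- stated objective: alternative
-- what changed: A loops over positions, rescanning with paths.count and growing each key's list incrementally; B loops over the DISTINCT paths (dict.fromkeys) and, for each, gathers its complete index list in one comprehension, keeping it only if it has more than one entry - no incremental per-key accumulation at all.
import Mathlib
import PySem

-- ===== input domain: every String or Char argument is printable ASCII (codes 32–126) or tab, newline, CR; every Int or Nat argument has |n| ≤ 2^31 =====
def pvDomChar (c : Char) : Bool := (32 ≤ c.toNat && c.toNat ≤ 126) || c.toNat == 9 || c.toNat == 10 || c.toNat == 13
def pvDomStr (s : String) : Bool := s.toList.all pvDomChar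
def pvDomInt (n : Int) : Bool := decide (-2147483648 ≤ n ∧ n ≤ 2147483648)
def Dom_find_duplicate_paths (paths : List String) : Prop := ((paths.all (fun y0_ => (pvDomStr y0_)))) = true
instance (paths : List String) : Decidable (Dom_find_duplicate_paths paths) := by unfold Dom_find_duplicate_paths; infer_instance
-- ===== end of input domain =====

-- B iterates over the distinct paths (dict.fromkeys) and gathers each one's complete index list in a single comprehension, instead of A's per-position count-rescan with incremental list growth; a structurally different traversal of similar cost.

-- ===== PORT A =====
def find_duplicate_paths (paths : List String) : List (String × List Int) :=
  ((PySem.List.enumerate paths 0).foldl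
    (fun path_dict p =>
      if paths.count p.2 > 1 then
        if path_dict.contains p.2 then
          path_dict.modify p.2 [] (fun v => v ++ [p.1])
        else
          path_dict.insert p.2 [p.1]
      else path_dict)
    PySem.Dict.empty).items

-- ===== PORT B =====
def find_duplicate_paths_alt (paths : List String) : List (String × List Int) :=
  ((PySem.List.dedup paths).foldl
    (fun result path =>
      let idxs := ((PySem.List.enumerate paths 0).filter (fun p => p.2 == path)).map (fun p => p.1)
      if idxs.length > 1 then result.insert path idxs else result)
    PySem.Dict.empty).items

-- ===== PRECONDITION & SPEC =====
def Spec_find_duplicate_paths (paths : List String) (out : List (String × List Int)) : Prop := out = find_duplicate_paths_alt paths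
instance (paths : List String) (out : List (String × List Int)) : Decidable (Spec_find_duplicate_paths paths out) := by unfold Spec_find_duplicate_paths; infer_instance

-- ===== CLAIM (what is proved, stated in full; the proofs are below) =====
def Claim_equal_find_duplicate_paths : Prop := ∀ (paths : List String), Dom_find_duplicate_paths paths → Spec_find_duplicate_paths paths (find_duplicate_paths paths)

-- ===== LEMMAS AND PROOFS =====

-- the complete index list of one path (B's inner comprehension)
def pvIdxs (paths : List String) (k : String) : List Int :=
  ((PySem.List.enumerate paths 0).filter (fun p => p.2 == k)).map (fun p => p.1)

-- filter by a key predicate commutes with replacing the value stored at one key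
lemma filter_map_replace (pred : String → Bool) (k : String) (w : List Int)
    (xs : List (String × List Int)) :
    (xs.map (fun q => if q.1 == k then (k, w) else q)).filter (fun q => pred q.1)
    = (xs.filter (fun q => pred q.1)).map (fun q => if q.1 == k then (k, w) else q) := by
  rw [List.filter_map]
  congr 1
  apply List.filter_congr
  intro q _
  by_cases hq : q.1 = k <;> simp [Function.comp, hq]

lemma any_filter_key_true (pred : String → Bool) (k : String)
    (xs : List (String × List Int)) (hk : pred k = true) :
    (xs.filter (fun q => pred q.1)).any (fun q => q.1 == k) = xs.any (fun q => q.1 == k) := by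
  induction xs with
  | nil => rfl
  | cons x xs ih =>
    by_cases hx : x.1 = k
    · simp [hx, hk]
    · cases hpx : pred x.1 <;> simp [hpx, hx, ih]

lemma any_filter_key_false (pred : String → Bool) (k : String)
    (xs : List (String × List Int)) (hk : pred k = false) :
    (xs.filter (fun q => pred q.1)).any (fun q => q.1 == k) = false := by
  induction xs with
  | nil => rfl
  | cons x xs ih =>
    by_cases hx : x.1 = k
    · simp [hx, hk, ih]
    · cases hpx : pred x.1 <;> simp [hpx, hx, ih]

-- dA's keys stay Nodup when its items are a filtered copy of dB's
lemma nodup_keys_of_items_filter (pred : String × List Int → Bool)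
    (dA dB : PySem.Dict String (List Int)) (hnd : dB.keys.Nodup)
    (h : dA.items = dB.items.filter pred) : dA.keys.Nodup := by
  have hsub : (dA.items.map (fun q => q.1)).Sublist (dB.items.map (fun q => q.1)) := by
    rw [h]; exact List.filter_sublist.map _
  have hnd2 : (dB.items.map (fun q => q.1)).Nodup := by simpa only [PySem.Dict.keys] using hnd
  simpa only [PySem.Dict.keys] using List.Nodup.sublist hsub hnd2

-- the stored lists agree at a key both dicts carry (pred holds at that key)
lemma getD_eq_of_filter (pred : String → Bool)
    (dA dB : PySem.Dict String (List Int)) (hnd : dB.keys.Nodup)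
    (h : dA.items = dB.items.filter (fun q => pred q.1))
    (k : String) (hc : dB.contains k = true) (hk : pred k = true) :
    dA.getD k [] = dB.getD k [] := by
  rw [PySem.Dict.contains_eq_isSome_get?] at hc
  obtain ⟨v, hv⟩ := Option.isSome_iff_exists.mp hc
  have hmem : (k, v) ∈ dB.items := PySem.Dict.mem_items_of_get?_eq_some _ hv
  have hmemA : (k, v) ∈ dA.items := by
    rw [h]; exact List.mem_filter.mpr ⟨hmem, by simpa using hk⟩
  have hndA : dA.keys.Nodup := nodup_keys_of_items_filter _ dA dB hnd h
  rw [PySem.Dict.getD_of_mem_items _ hmemA hndA [], PySem.Dict.getD_of_mem_items _ hmem hnd []]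

-- contains transfers through the filtered-items relation
lemma contains_of_items_filter (pred : String → Bool)
    (dA dB : PySem.Dict String (List Int))
    (h : dA.items = dB.items.filter (fun q => pred q.1)) (k : String) :
    dA.contains k = (dB.contains k && pred k) := by
  cases hk : pred k with
  | true =>
    simp only [PySem.Dict.contains, h, Bool.and_true]
    exact any_filter_key_true pred k dB.items hk
  | false =>
    simp only [PySem.Dict.contains, h, Bool.and_false]
    exact any_filter_key_false pred k dB.items hk

-- A's loop invariant: A's dict is the full index table filtered by "this path occurs more than once"
lemma loop_items (paths : List String) (l : List (Int × String))
    (dA dB : PySem.Dict String (List Int))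
    (hnd : dB.keys.Nodup)
    (h : dA.items = dB.items.filter (fun q => decide (paths.count q.1 > 1))) :
    (l.foldl (fun path_dict p =>
        if paths.count p.2 > 1 then
          if path_dict.contains p.2 then path_dict.modify p.2 [] (fun v => v ++ [p.1])
          else path_dict.insert p.2 [p.1]
        else path_dict) dA).items
    = ((l.foldl (fun index_map p => index_map.modify p.2 [] (fun v => v ++ [p.1])) dB).items).filter
        (fun q => decide (paths.count q.1 > 1)) := by
  induction l generalizing dA dB with
  | nil => simpa using h
  | cons p l ih =>
    simp only [List.foldl_cons]
    have hnd' : (dB.modify p.2 [] (fun v => v ++ [p.1])).keys.Nodup :=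
      PySem.Dict.nodup_keys_insert _ _ _ hnd
    apply ih _ _ hnd'
    have hcontains := contains_of_items_filter (fun k => decide (paths.count k > 1)) dA dB h p.2
    by_cases hcnt : paths.count p.2 > 1
    · rw [if_pos hcnt]
      have hk : decide (paths.count p.2 > 1) = true := by simpa using hcnt
      rw [hk, Bool.and_true] at hcontains
      cases hc : dB.contains p.2 with
      | true =>
        rw [hcontains, hc, if_pos rfl]
        have hgetD : dA.getD p.2 [] = dB.getD p.2 [] :=
          getD_eq_of_filter (fun k => decide (paths.count k > 1)) dA dB hnd h p.2 hc (by simpa using hcnt)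
        have hcA : dA.contains p.2 = true := by rw [hcontains, hc]
        simp only [PySem.Dict.modify, hgetD]
        rw [PySem.Dict.items_insert_of_contains _ _ hcA,
            PySem.Dict.items_insert_of_contains _ _ hc, h]
        exact (filter_map_replace (fun k => decide (paths.count k > 1)) p.2 _ dB.items).symm
      | false =>
        rw [hcontains, hc, if_neg (by simp)]
        have hcA : dA.contains p.2 = false := by rw [hcontains, hc]
        have hgetD : dB.getD p.2 [] = [] := PySem.Dict.getD_of_not_contains _ [] hc
        simp only [PySem.Dict.modify, hgetD]
        rw [PySem.Dict.items_insert_of_not_contains _ _ hcA,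
            PySem.Dict.items_insert_of_not_contains _ _ hc,
            List.filter_append, h]
        simp [hcnt]
    · rw [if_neg hcnt]
      have hk : decide (paths.count p.2 > 1) = false := by simpa using hcnt
      simp only [PySem.Dict.modify]
      cases hc : dB.contains p.2 with
      | true =>
        rw [PySem.Dict.items_insert_of_contains _ _ hc]
        rw [filter_map_replace (fun k => decide (paths.count k > 1)) p.2 _ dB.items, ← h]
        have : ∀ q ∈ dA.items, (fun q : String × List Int =>
            if q.1 == p.2 then (p.2, dB.getD p.2 [] ++ [p.1]) else q) q = q := by
          intro q hq
          have hqk : decide (paths.count q.1 > 1) = true := by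
            rw [h] at hq; exact (List.mem_filter.mp hq).2
          have : q.1 ≠ p.2 := by
            intro he; rw [he, hk] at hqk; exact Bool.false_ne_true hqk
          simp [this]
        rw [List.map_congr_left this]
        simp
      | false =>
        rw [PySem.Dict.items_insert_of_not_contains _ _ hc, List.filter_append, h]
        simp [hk]

-- the full index table's items: one entry per distinct path, carrying its complete index list
lemma full_table_items (paths : List String) :
    ((PySem.List.enumerate paths 0).foldl
        (fun index_map p => index_map.modify p.2 [] (fun v => v ++ [p.1]))
        PySem.Dict.empty).items
    = (PySem.List.dedup paths).map (fun k => (k, pvIdxs paths k)) := by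
  set d := (PySem.List.enumerate paths 0).foldl
      (fun index_map p => index_map.modify p.2 [] (fun v => v ++ [p.1]))
      PySem.Dict.empty with hd
  have hnd : d.keys.Nodup := by
    rw [hd]
    exact PySem.Dict.nodup_keys_foldl_modify_key (PySem.List.enumerate paths 0) (fun p => p.2) []
      (fun _ p v => v ++ [p.1]) PySem.Dict.empty PySem.Dict.nodup_keys_empty
  have hkeys : d.keys = PySem.List.dedup paths := by
    rw [hd]
    rw [PySem.Dict.keys_foldl_modify_key (PySem.List.enumerate paths 0) (fun p => p.2) []
      (fun _ p v => v ++ [p.1]) PySem.Dict.empty]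
    rw [PySem.Dict.keys_empty, PySem.Set.update_nil_left, PySem.List.map_snd_enumerate,
      PySem.List.dedup_eq_ofList]
  have hget : ∀ k, d.getD k [] = pvIdxs paths k := by
    intro k
    have hswap : d = (((PySem.List.enumerate paths 0).map Prod.swap).foldl
        (fun d r => d.modify r.1 [] (fun v => v ++ [r.2])) PySem.Dict.empty) := by
      rw [hd, List.foldl_map]; rfl
    rw [hswap, PySem.Dict.getD_foldl_modify_append, PySem.Dict.getD_empty, List.nil_append,
      pvIdxs, List.filter_map, List.map_map]
    rfl
  rw [PySem.Dict.items_eq_map_keys d hnd [], hkeys]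
  apply List.map_congr_left
  intro k _
  rw [hget k]

-- every stored list in the full table has length = paths.count of its key
lemma idxs_len (paths : List String) (k : String) :
    (pvIdxs paths k).length = paths.count k := by
  rw [pvIdxs, List.length_map, ← List.countP_eq_length_filter]
  have hcp : (PySem.List.enumerate paths 0).countP (fun p => p.2 == k)
      = ((PySem.List.enumerate paths 0).map (fun p => p.2)).count k := by
    rw [List.count_eq_countP, List.countP_map]
    rfl
  rw [hcp, PySem.List.map_snd_enumerate]

-- B's loop: over distinct fresh keys, conditional insert appends the kept entries in order
lemma alt_loop_items (paths : List String) (l : List String)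
    (d : PySem.Dict String (List Int))
    (hndl : l.Nodup) (hfresh : ∀ k ∈ l, d.contains k = false) :
    (l.foldl (fun result path =>
        let idxs := ((PySem.List.enumerate paths 0).filter (fun p => p.2 == path)).map (fun p => p.1)
        if idxs.length > 1 then result.insert path idxs else result) d).items
    = d.items ++ (l.filter (fun k => decide ((pvIdxs paths k).length > 1))).map
        (fun k => (k, pvIdxs paths k)) := by
  induction l generalizing d with
  | nil => simp
  | cons x l ih =>
    simp only [List.foldl_cons, List.filter_cons]
    have hx : d.contains x = false := hfresh x (by simp)
    have hndl' : l.Nodup := (List.nodup_cons.mp hndl).2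
    have hxl : x ∉ l := (List.nodup_cons.mp hndl).1
    by_cases hc : (pvIdxs paths x).length > 1
    · have hcb : decide ((pvIdxs paths x).length > 1) = true := by simpa using hc
      rw [hcb]
      simp only [pvIdxs] at hc
      rw [if_pos hc]
      rw [ih _ hndl' ?_]
      · rw [PySem.Dict.items_insert_of_not_contains _ _ hx]
        simp [pvIdxs]
      · intro k hk
        rw [PySem.Dict.contains_insert]
        have : k ≠ x := fun he => hxl (he ▸ hk)
        simp [this, hfresh k (by simp [hk])]
    · have hcb : decide ((pvIdxs paths x).length > 1) = false := by simpa using hc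
      rw [hcb]
      simp only [pvIdxs] at hc
      rw [if_neg hc]
      exact ih _ hndl' (fun k hk => hfresh k (by simp [hk]))

-- ===== VERDICT (by name: the statement is the Claim_ definition above) =====
theorem find_duplicate_paths_spec : Claim_equal_find_duplicate_paths := by
  intro paths _
  unfold Spec_find_duplicate_paths find_duplicate_paths find_duplicate_paths_alt
  rw [loop_items paths (PySem.List.enumerate paths 0) PySem.Dict.empty PySem.Dict.empty
      PySem.Dict.nodup_keys_empty (by rfl)]
  rw [full_table_items paths]
  rw [alt_loop_items paths (PySem.List.dedup paths) PySem.Dict.empty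
      (by rw [PySem.List.dedup_eq_ofList]; exact (PySem.Set.nodup_ofList (xs := paths)))
      (fun k _ => by simp)]
  rw [List.filter_map]
  show _ = [] ++ _
  rw [List.nil_append]
  congr 1
  apply List.filter_congr
  intro k _
  simp [Function.comp, idxs_len paths k]
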